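-- pv_equiv track=rewrite | github.com/Lnic/YaDc | src/pss_training.py | _get_key_for_training_sort
-- ===== SOURCE A (Python) =====
-- TRAINING_DESIGN_KEY_NAME = 'TrainingDesignId'
--
-- def _get_key_for_training_sort(training_info: dict, trainings_data: dict) -> str:
--     result = ''
--     parent_infos = _get_parents(training_info, trainings_data)
--     if parent_infos:
--         for parent_info in parent_infos:
--             result += parent_info[TRAINING_DESIGN_KEY_NAME].zfill(4)
--     result += training_info[TRAINING_DESIGN_KEY_NAME].zfill(4)
--     return result
--
-- def _get_parents(training_info: dict, trainings_data: dict) -> list: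
--     parent_training_design_id = training_info['RequiredTrainingDesignId']
--     if parent_training_design_id == '0':
--         parent_training_design_id = None
--
--     if parent_training_design_id is not None:
--         parent_info = trainings_data[parent_training_design_id]
--         result = _get_parents(parent_info, trainings_data)
--         result.append(parent_info)
--         return result
--     else:
--         return []
-- ===== SOURCE B (Python) =====
-- TRAINING_DESIGN_KEY_NAME = 'TrainingDesignId'
--
-- def _get_key_for_training_sort(training_info: dict, trainings_data: dict) -> str:
--     keys = []
--     node = training_info
--     while True:
--         keys.append(node[TRAINING_DESIGN_KEY_NAME].zfill(4))
--         pid = node['RequiredTrainingDesignId']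
--         if pid == '0':
--             break
--         node = trainings_data[pid]
--     return ''.join(reversed(keys))
-- ===== Notes on version B (the rewrite author's own statement) =====
-- stated objective: simpler
-- what changed: Replaces the recursive _get_parents helper that materialises the list of parent dicts (built back-to-front by appending after each recursive return) plus a separate concatenation loop with a single iterative walk up the parent chain that collects the zfilled ids self-first and joins them reversed.
import Mathlib
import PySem

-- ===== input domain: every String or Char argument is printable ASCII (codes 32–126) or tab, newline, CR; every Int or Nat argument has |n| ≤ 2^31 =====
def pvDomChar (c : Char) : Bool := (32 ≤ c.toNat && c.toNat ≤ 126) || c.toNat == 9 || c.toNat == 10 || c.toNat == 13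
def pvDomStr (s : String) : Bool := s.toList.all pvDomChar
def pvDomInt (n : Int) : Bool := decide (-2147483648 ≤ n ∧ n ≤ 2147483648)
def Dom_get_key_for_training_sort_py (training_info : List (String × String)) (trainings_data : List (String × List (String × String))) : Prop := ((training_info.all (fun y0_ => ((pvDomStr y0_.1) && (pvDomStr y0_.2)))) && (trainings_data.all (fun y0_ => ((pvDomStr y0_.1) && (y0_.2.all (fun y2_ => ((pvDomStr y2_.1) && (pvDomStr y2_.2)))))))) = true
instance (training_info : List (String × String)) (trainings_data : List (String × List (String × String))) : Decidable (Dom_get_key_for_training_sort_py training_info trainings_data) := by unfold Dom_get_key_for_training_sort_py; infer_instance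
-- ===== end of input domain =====

-- B inlines the recursive _get_parents (which builds the parent-dict list back-to-front) into one
-- iterative walk up the chain collecting zfilled ids self-first, joined reversed; objective: simpler.

-- ===== PORT A =====
-- first-match association-list lookup (Python dict[k]; missing key = default, excluded by Pre_)
def pvGetS (d : List (String × String)) (k dflt : String) : String :=
  (List.lookup k d).getD dflt

def pvGetL (d : List (String × List (String × String))) (k : String) : List (String × String) :=
  (List.lookup k d).getD []

-- _get_parents, fuelled by |trainings_data|+1 (a terminating chain never needs more; Pre_ guarantees it)
def getParentsA : Nat → List (String × String) → List (String × List (String × String)) → List (List (String × String))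
  | 0, _, _ => []
  | n+1, ti, td =>
    let pid := pvGetS ti "RequiredTrainingDesignId" "0"
    if pid = "0" then []
    else
      let pinfo := pvGetL td pid
      getParentsA n pinfo td ++ [pinfo]

def get_key_for_training_sort_py (training_info : List (String × String)) (trainings_data : List (String × List (String × String))) : String :=
  let parent_infos := getParentsA (trainings_data.length + 1) training_info trainings_data
  let result := parent_infos.foldl (fun acc p => acc ++ PySem.Str.zfill (pvGetS p "TrainingDesignId" "") 4) ""
  result ++ PySem.Str.zfill (pvGetS training_info "TrainingDesignId" "") 4

-- ===== PORT B =====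
-- the while-loop of Source B, fuelled the same way; collects zfilled ids self-first
def altWalk : Nat → List (String × String) → List (String × List (String × String)) → List String → List String
  | 0, _, _, keys => keys
  | n+1, node, td, keys =>
    let keys2 := keys ++ [PySem.Str.zfill (pvGetS node "TrainingDesignId" "") 4]
    let pid := pvGetS node "RequiredTrainingDesignId" "0"
    if pid = "0" then keys2
    else altWalk n (pvGetL td pid) td keys2

def get_key_for_training_sort_py_alt (training_info : List (String × String)) (trainings_data : List (String × List (String × String))) : String :=
  PySem.Str.join "" (altWalk (trainings_data.length + 1) training_info trainings_data []).reverse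

-- ===== PRECONDITION & SPEC =====
-- Pre_ excludes exactly the inputs where Python A raises: a missing 'TrainingDesignId' /
-- 'RequiredTrainingDesignId' / parent-id key (KeyError) or a cyclic parent chain
-- (RecursionError); a terminating chain visits at most |trainings_data|+1 nodes, so the
-- fuel bound excludes nothing on which A returns.
def chainOk : Nat → List (String × String) → List (String × List (String × String)) → Bool
  | 0, _, _ => false
  | n+1, node, td =>
    (List.lookup "TrainingDesignId" node).isSome &&
    match List.lookup "RequiredTrainingDesignId" node with
    | none => false
    | some pid =>
      if pid = "0" then true
      else
        match List.lookup pid td with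
        | none => false
        | some p => chainOk n p td

def Pre_get_key_for_training_sort_py (training_info : List (String × String)) (trainings_data : List (String × List (String × String))) : Prop :=
  chainOk (trainings_data.length + 1) training_info trainings_data = true
instance (training_info : List (String × String)) (trainings_data : List (String × List (String × String))) : Decidable (Pre_get_key_for_training_sort_py training_info trainings_data) := by unfold Pre_get_key_for_training_sort_py; infer_instance

def pvWitness_get_key_for_training_sort_py : (List (String × String)) × (List (String × List (String × String))) :=
  ([("TrainingDesignId", "7"), ("RequiredTrainingDesignId", "2")],
   [("2", [("TrainingDesignId", "2"), ("RequiredTrainingDesignId", "5")]),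
    ("5", [("TrainingDesignId", "5"), ("RequiredTrainingDesignId", "0")])])

def Spec_get_key_for_training_sort_py (training_info : List (String × String)) (trainings_data : List (String × List (String × String))) (out : String) : Prop := out = get_key_for_training_sort_py_alt training_info trainings_data
instance (training_info : List (String × String)) (trainings_data : List (String × List (String × String))) (out : String) : Decidable (Spec_get_key_for_training_sort_py training_info trainings_data out) := by unfold Spec_get_key_for_training_sort_py; infer_instance

-- ===== CLAIM (what is proved, stated in full; the proofs are below) =====
def Claim_equal_get_key_for_training_sort_py : Prop := ∀ (training_info : List (String × String)) (trainings_data : List (String × List (String × String))), Dom_get_key_for_training_sort_py training_info trainings_data → Pre_get_key_for_training_sort_py training_info trainings_data → Spec_get_key_for_training_sort_py training_info trainings_data (get_key_for_training_sort_py training_info trainings_data)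

-- ===== LEMMAS AND PROOFS =====
theorem join_empty_nil : PySem.Str.join "" [] = "" := rfl

theorem join_empty_cons (x : String) (l : List String) :
    PySem.Str.join "" (x :: l) = x ++ PySem.Str.join "" l := by
  cases l with
  | nil => simp [PySem.Str.join, PySem.Chars.join, List.intercalate]
  | cons y t =>
      simp [PySem.Str.join, PySem.Chars.join, List.intercalate, String.ofList_append]

theorem join_empty_append (l₁ l₂ : List String) :
    PySem.Str.join "" (l₁ ++ l₂) = PySem.Str.join "" l₁ ++ PySem.Str.join "" l₂ := by
  induction l₁ with
  | nil => simp [join_empty_nil]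
  | cons x t ih => simp [join_empty_cons, ih, String.append_assoc]

-- the zfilled id of a node
def key4 (node : List (String × String)) : String :=
  PySem.Str.zfill (pvGetS node "TrainingDesignId" "") 4

theorem foldl_key4 (ps : List (List (String × String))) (a : String) :
    ps.foldl (fun acc p => acc ++ PySem.Str.zfill (pvGetS p "TrainingDesignId" "") 4) a
      = a ++ PySem.Str.join "" (ps.map key4) := by
  induction ps generalizing a with
  | nil => simp [join_empty_nil]
  | cons p t ih => simp [ih, join_empty_cons, key4, String.append_assoc]

theorem altWalk_eq (td : List (String × List (String × String))) :
    ∀ (n : Nat) (node : List (String × String)) (keys : List String),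
      chainOk n node td = true →
      altWalk n node td keys
        = keys ++ ((getParentsA n node td).map key4 ++ [key4 node]).reverse := by
  intro n
  induction n with
  | zero => intro node keys h; simp [chainOk] at h
  | succ n ih =>
      intro node keys h
      simp only [chainOk, Bool.and_eq_true] at h
      obtain ⟨-, h⟩ := h
      cases hreq : List.lookup "RequiredTrainingDesignId" node with
      | none => rw [hreq] at h; simp at h
      | some pid =>
          rw [hreq] at h
          dsimp only at h
          by_cases hpid : pid = "0"
          · subst hpid
            simp only [altWalk, getParentsA, pvGetS, hreq, Option.getD_some]
            simp [key4, pvGetS]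
          · rw [if_neg hpid] at h
            cases hp : List.lookup pid td with
            | none => rw [hp] at h; simp at h
            | some p =>
                rw [hp] at h
                dsimp only at h
                simp only [altWalk, getParentsA, pvGetS, pvGetL, hreq, hp,
                  Option.getD_some, if_neg hpid]
                rw [ih p _ h]
                simp [key4, pvGetS]
-- ===== VERDICT (by name: the statement is the Claim_ definition above) =====
theorem get_key_for_training_sort_py_spec : Claim_equal_get_key_for_training_sort_py := by
  intro ti td _ hpre
  unfold Spec_get_key_for_training_sort_py
  unfold get_key_for_training_sort_py get_key_for_training_sort_py_alt
  rw [altWalk_eq td _ ti [] hpre]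
  simp only [List.nil_append, List.reverse_reverse]
  rw [foldl_key4, join_empty_append]
  simp [join_empty_cons, join_empty_nil, key4]
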